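-- pv_equiv track=rewrite | github.com/Mar1oGomez/proyecto-de-sistemas | preposicioness4.py | identificar_operadores
-- ===== SOURCE A (Python) =====
-- def identificar_operadores(proposicion):
--     proposicion = proposicion.lower()
--     operadores = []
--     proposiciones_simples = []
--     tokens = proposicion.split()
--     temp_proposicion = []
--     negacion = False
--
--     for token in tokens:
--         if token == "no":
--             negacion = True
--         elif token in ["y", "and", "o", "or"]:
--             operadores.append("and" if token in ["y", "and"] else "or")
--             proposicion_texto = " ".join(temp_proposicion).strip()
--             if negacion:
--                 proposiciones_simples.append("¬" + proposicion_texto)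
--                 negacion = False
--             else:
--                 proposiciones_simples.append(proposicion_texto)
--             temp_proposicion = []
--         else:
--             temp_proposicion.append(token)
--
--     # Agregar la última proposición, con negación si aplica
--     proposicion_texto = " ".join(temp_proposicion).strip()
--     if negacion:
--         proposiciones_simples.append("¬" + proposicion_texto)
--     else:
--         proposiciones_simples.append(proposicion_texto)
--
--     return operadores, proposiciones_simples
-- ===== SOURCE B (Python) =====
-- def _operador(token):
--     if token in ("y", "and"):
--         return "and"
--     if token in ("o", "or"):
--         return "or"
--     return None
--
--
-- def identificar_operadores(proposicion):
--     # Phase 1: split the token list into segments at operator tokens,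
--     # collecting the normalised operators as we go.
--     tokens = proposicion.lower().split()
--     operadores = []
--     segmentos = []
--     actual = []
--     for token in tokens:
--         op = _operador(token)
--         if op is not None:
--             operadores.append(op)
--             segmentos.append(actual)
--             actual = []
--         else:
--             actual.append(token)
--     segmentos.append(actual)
--     # Phase 2: map each segment to its simple proposition: negated iff it
--     # contains "no", text = the segment's words without the "no"s.
--     proposiciones_simples = [
--         ("¬" if "no" in seg else "") + " ".join(w for w in seg if w != "no")
--         for seg in segmentos
--     ]
--     return operadores, proposiciones_simples
-- ===== Notes on version B (the rewrite author's own statement) =====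
-- stated objective: alternative
-- what changed: A's single loop threading a temp-word buffer and a negation flag is replaced by a two-phase pipeline: one pass splits the token list into segments at operator tokens (collecting normalised operators), then each segment is mapped to its simple proposition (negated iff it contains 'no', text = the words without the 'no's).
import Mathlib
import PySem

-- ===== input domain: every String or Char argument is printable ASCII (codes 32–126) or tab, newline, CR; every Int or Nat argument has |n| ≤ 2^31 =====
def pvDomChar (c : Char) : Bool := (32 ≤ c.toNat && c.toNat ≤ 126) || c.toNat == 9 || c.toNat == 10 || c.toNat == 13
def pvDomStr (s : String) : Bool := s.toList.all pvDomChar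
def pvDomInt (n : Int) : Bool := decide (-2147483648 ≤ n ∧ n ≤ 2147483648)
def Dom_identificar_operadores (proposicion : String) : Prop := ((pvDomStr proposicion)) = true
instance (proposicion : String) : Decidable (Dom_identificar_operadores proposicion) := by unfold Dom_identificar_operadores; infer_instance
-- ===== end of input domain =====

-- B replaces A's single accumulator loop by two phases (split the tokens into
-- segments at operator tokens, then map each segment to its proposition);
-- objective: alternative decomposition, same value everywhere.

-- ===== PORT A =====
-- the 'proposicion_texto = " ".join(temp_proposicion).strip()' + negation step of A
def pvAEmit (temp : List String) (neg : Bool) : String :=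
  let txt := PySem.Str.strip (PySem.Str.join " " temp)
  if neg then "¬" ++ txt else txt

-- A's for-loop over tokens, state (operadores, proposiciones_simples, temp_proposicion, negacion)
def pvALoop : List String → List String → List String → List String → Bool → List String × List String
  | [], ops, props, temp, neg => (ops, props ++ [pvAEmit temp neg])
  | t :: rest, ops, props, temp, neg =>
      if t = "no" then pvALoop rest ops props temp true
      else if t = "y" ∨ t = "and" ∨ t = "o" ∨ t = "or" then
        pvALoop rest (ops ++ [if t = "y" ∨ t = "and" then "and" else "or"])
          (props ++ [pvAEmit temp neg]) [] false
      else pvALoop rest ops props (temp ++ [t]) neg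

def identificar_operadores (proposicion : String) : List String × List String :=
  pvALoop (PySem.Str.split₀ (PySem.Str.lower proposicion)) [] [] [] false

-- ===== PORT B =====
-- _operador of Source B
def pvBOp (t : String) : Option String :=
  if t = "y" ∨ t = "and" then some "and"
  else if t = "o" ∨ t = "or" then some "or"
  else none

-- phase 1 of Source B: state (operadores, segmentos, actual)
def pvBSplit : List String → List String → List (List String) → List String → List String × List (List String)
  | [], ops, segs, cur => (ops, segs ++ [cur])
  | t :: rest, ops, segs, cur =>
      match pvBOp t with
      | some op => pvBSplit rest (ops ++ [op]) (segs ++ [cur]) []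
      | none => pvBSplit rest ops segs (cur ++ [t])

-- phase 2 of Source B: one segment → its simple proposition
def pvBProp (seg : List String) : String :=
  (if seg.contains "no" then "¬" else "") ++
    PySem.Str.join " " (seg.filter (fun w => w ≠ "no"))

def identificar_operadores_alt (proposicion : String) : List String × List String :=
  let r := pvBSplit (PySem.Str.split₀ (PySem.Str.lower proposicion)) [] [] []
  (r.1, r.2.map pvBProp)

-- ===== PRECONDITION & SPEC =====
def Spec_identificar_operadores (proposicion : String) (out : List String × List String) : Prop := out = identificar_operadores_alt proposicion
instance (proposicion : String) (out : List String × List String) : Decidable (Spec_identificar_operadores proposicion out) := by unfold Spec_identificar_operadores; infer_instance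

-- ===== CLAIM (what is proved, stated in full; the proofs are below) =====
def Claim_equal_identificar_operadores : Prop := ∀ (proposicion : String), Dom_identificar_operadores proposicion → Spec_identificar_operadores proposicion (identificar_operadores proposicion)

-- ===== LEMMAS AND PROOFS =====

-- a "good" word: nonempty and whitespace-free (what str.split() produces)
def pvGood (w : String) : Prop :=
  w.toList ≠ [] ∧ ∀ c ∈ w.toList, PySem.Chars.isspace c = false

-- every word produced by split₀.go from a whitespace-free partial word is good
theorem pvGoAux (s : List Char) : ∀ (cur : List Char) (acc : List (List Char)),
    (∀ c ∈ cur, PySem.Chars.isspace c = false) →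
    (∀ l ∈ acc, l ≠ [] ∧ ∀ c ∈ l, PySem.Chars.isspace c = false) →
    ∀ l ∈ PySem.Chars.split₀.go s cur acc, l ≠ [] ∧ ∀ c ∈ l, PySem.Chars.isspace c = false := by
  induction s with
  | nil =>
      intro cur acc hcur hacc l hl
      by_cases hc : cur = []
      · subst hc; simp [PySem.Chars.split₀.go] at hl
        exact hacc l hl
      · simp [PySem.Chars.split₀.go, List.isEmpty_iff, hc] at hl
        rcases hl with h | h
        · exact hacc l h
        · subst h
          refine ⟨by simpa using hc, ?_⟩
          intro c hc'; exact hcur c (by simpa using hc')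
  | cons c rest ih =>
      intro cur acc hcur hacc l hl
      by_cases hs : PySem.Chars.isspace c = true
      · by_cases hc : cur = []
        · subst hc
          simp only [PySem.Chars.split₀.go, hs, if_pos, List.isEmpty_nil] at hl
          exact ih [] acc (by simp) hacc l hl
        · simp only [PySem.Chars.split₀.go, hs, if_pos, List.isEmpty_iff, if_neg hc] at hl
          refine ih [] _ (by simp) ?_ l hl
          intro l' hl'
          rcases List.mem_cons.mp hl' with h | h
          · subst h
            refine ⟨by simpa using hc, ?_⟩
            intro c' hc'; exact hcur c' (by simpa using hc')
          · exact hacc l' h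
      · simp only [PySem.Chars.split₀.go, hs, if_neg, Bool.not_eq_true] at hl
        refine ih (c :: cur) acc ?_ hacc l hl
        intro c' hc'
        rcases List.mem_cons.mp hc' with h | h
        · subst h; simpa using hs
        · exact hcur c' h

theorem pvGoodSplit (s : String) : ∀ w ∈ PySem.Str.split₀ s, pvGood w := by
  intro w hw
  simp only [PySem.Str.split₀, List.mem_map] at hw
  obtain ⟨l, hl, rfl⟩ := hw
  have := pvGoAux s.toList [] [] (by simp) (by simp) l hl
  exact ⟨by simpa using this.1, by simpa using this.2⟩

-- strip is the identity when both end characters are not whitespace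
theorem pvStripId (l : List Char)
    (h1 : ∀ c, l.head? = some c → PySem.Chars.isspace c = false)
    (h2 : ∀ c, l.getLast? = some c → PySem.Chars.isspace c = false) :
    PySem.Chars.strip l = l := by
  have hl : PySem.Chars.lstrip l = l := by
    cases l with
    | nil => rfl
    | cons c t =>
        have := h1 c (by simp)
        simp [PySem.Chars.lstrip, this]
  have hr : PySem.Chars.rstrip l = l := by
    unfold PySem.Chars.rstrip
    cases hrev : l.reverse with
    | nil => simp [List.reverse_eq_nil_iff.mp hrev]
    | cons c t =>
        have hlast : l.getLast? = some c := by
          rw [← List.head?_reverse, hrev]; rfl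
        have := h2 c hlast
        rw [List.dropWhile_cons]
        simp only [this, Bool.false_eq_true, if_false]
        rw [show (c :: t) = l.reverse from hrev.symm, List.reverse_reverse]
  unfold PySem.Chars.strip
  rw [hl, hr]

-- head / last character of ' '.join(good words) is a character of a word
theorem pvJoinHead (ls : List (List Char))
    (h : ∀ l ∈ ls, l ≠ [] ∧ ∀ c ∈ l, PySem.Chars.isspace c = false) :
    ∀ c, (PySem.Chars.join [' '] ls).head? = some c → PySem.Chars.isspace c = false := by
  cases ls with
  | nil => intro c hc; simp [PySem.Chars.join, List.intercalate] at hc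
  | cons l rest =>
      intro c hc
      have hgood := h l (by simp)
      have hhead : (PySem.Chars.join [' '] (l :: rest)).head? = l.head? := by
        cases rest with
        | nil => simp [PySem.Chars.join, List.intercalate]
        | cons r t =>
            have : PySem.Chars.join [' '] (l :: r :: t) = l ++ ([' '] ++ PySem.Chars.join [' '] (r :: t)) := by
              simp [PySem.Chars.join, List.intercalate, List.intersperse]
            rw [this, List.head?_append]
            cases hL : l.head? with
            | none => exact absurd (List.head?_eq_none_iff.mp hL) hgood.1
            | some x => rfl
      rw [hhead] at hc
      exact hgood.2 c (List.mem_of_mem_head? (by rw [hc]; simp))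

theorem pvJoinLast (ls : List (List Char))
    (h : ∀ l ∈ ls, l ≠ [] ∧ ∀ c ∈ l, PySem.Chars.isspace c = false) :
    ∀ c, (PySem.Chars.join [' '] ls).getLast? = some c → PySem.Chars.isspace c = false := by
  induction ls with
  | nil => intro c hc; simp [PySem.Chars.join, List.intercalate] at hc
  | cons l rest ih =>
      intro c hc
      have hgood := h l (by simp)
      cases rest with
      | nil =>
          have hj1 : PySem.Chars.join [' '] [l] = l := by
            simp [PySem.Chars.join, List.intercalate]
          rw [hj1] at hc
          exact hgood.2 c (List.mem_of_mem_getLast? (by rw [hc]; simp))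
      | cons r t =>
          have hj : PySem.Chars.join [' '] (l :: r :: t) = l ++ ([' '] ++ PySem.Chars.join [' '] (r :: t)) := by
            simp [PySem.Chars.join, List.intercalate, List.intersperse]
          rw [hj, List.getLast?_append] at hc
          have hne : ([' '] ++ PySem.Chars.join [' '] (r :: t)) ≠ [] := by simp
          rw [List.getLast?_append] at hc
          have hrne : PySem.Chars.join [' '] (r :: t) ≠ [] := by
            intro hnil
            have hr := h r (by simp)
            cases ht : t with
            | nil => subst ht; simp [PySem.Chars.join, List.intercalate] at hnil; exact hr.1 hnil
            | cons r2 t2 =>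
                subst ht
                have : PySem.Chars.join [' '] (r :: r2 :: t2) = r ++ ([' '] ++ PySem.Chars.join [' '] (r2 :: t2)) := by
                  simp [PySem.Chars.join, List.intercalate, List.intersperse]
                rw [this] at hnil
                simp at hnil
          cases hg : (PySem.Chars.join [' '] (r :: t)).getLast? with
          | none => exact absurd (List.getLast?_eq_none_iff.mp hg) hrne
          | some x =>
              rw [hg] at hc
              simp only [Option.some_or, Option.some.injEq] at hc
              subst hc
              exact ih (fun l' hl' => h l' (by simp [hl'])) x hg

-- str.strip() is the identity on ' '.join(ws) for good words ws
theorem pvStripJoin (ws : List String) (h : ∀ w ∈ ws, pvGood w) :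
    PySem.Str.strip (PySem.Str.join " " ws) = PySem.Str.join " " ws := by
  have hgood : ∀ l ∈ ws.map String.toList, l ≠ [] ∧ ∀ c ∈ l, PySem.Chars.isspace c = false := by
    intro l hl
    obtain ⟨w, hw, rfl⟩ := List.mem_map.mp hl
    exact h w hw
  have hsep : (" " : String).toList = [' '] := rfl
  simp only [PySem.Str.strip, PySem.Str.join, String.toList_ofList, hsep]
  rw [pvStripId _ (pvJoinHead _ hgood) (pvJoinLast _ hgood)]

-- A's emission equals B's segment mapping, assuming good words
theorem pvEmitEq (cur : List String) (h : ∀ w ∈ cur, pvGood w) :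
    pvAEmit (cur.filter (fun w => w ≠ "no")) (cur.contains "no") = pvBProp cur := by
  have hstrip := pvStripJoin (cur.filter (fun w => w ≠ "no"))
    (fun w hw => h w (List.mem_of_mem_filter hw))
  unfold pvAEmit pvBProp
  rw [hstrip]
  cases hc : cur.contains "no" <;> simp

-- B's segment accumulator only prefixes the final segment list
theorem pvBSplitAcc (ts : List String) : ∀ (ops : List String) (segs : List (List String)) (cur : List String),
    pvBSplit ts ops segs cur = ((pvBSplit ts ops [] cur).1, segs ++ (pvBSplit ts ops [] cur).2) := by
  induction ts with
  | nil => intro ops segs cur; simp [pvBSplit]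
  | cons t rest ih =>
      intro ops segs cur
      cases hop : pvBOp t with
      | some op =>
          simp only [pvBSplit, hop, List.nil_append]
          rw [ih (ops ++ [op]) (segs ++ [cur]) [], ih (ops ++ [op]) [cur] []]
          simp
      | none => simp only [pvBSplit, hop]; exact ih ops segs (cur ++ [t])

-- the main invariant: A's loop state vs B's split state
theorem pvKey (ts : List String) : ∀ (ops props : List String) (cur : List String),
    (∀ w ∈ ts, pvGood w) → (∀ w ∈ cur, pvGood w) →
    pvALoop ts ops props (cur.filter (fun w => w ≠ "no")) (cur.contains "no")
      = ((pvBSplit ts ops [] cur).1, props ++ (pvBSplit ts ops [] cur).2.map pvBProp) := by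
  induction ts with
  | nil =>
      intro ops props cur _ hcur
      simp only [pvALoop, pvBSplit, List.nil_append, List.map_cons, List.map_nil]
      rw [pvEmitEq cur hcur]
  | cons t rest ih =>
      intro ops props cur hts hcur
      have ht : pvGood t := hts t (by simp)
      have hrest : ∀ w ∈ rest, pvGood w := fun w hw => hts w (by simp [hw])
      by_cases hno : t = "no"
      · subst hno
        have hop : pvBOp "no" = none := rfl
        simp only [pvALoop, pvBSplit, hop]
        have h1 : (cur ++ ["no"]).filter (fun w => w ≠ "no") = cur.filter (fun w => w ≠ "no") := by
          simp
        have h2 : (cur ++ ["no"]).contains "no" = true := by simp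
        have := ih ops props (cur ++ ["no"]) hrest
          (by intro w hw; rcases List.mem_append.mp hw with h | h
              · exact hcur w h
              · simp at h; subst h; exact ht)
        rw [h1, h2] at this
        exact this
      · by_cases hopc : t = "y" ∨ t = "and" ∨ t = "o" ∨ t = "or"
        · have hya : (t = "y" ∨ t = "and") ∨ (t = "o" ∨ t = "or") := by tauto
          have hop : pvBOp t = some (if t = "y" ∨ t = "and" then "and" else "or") := by
            unfold pvBOp
            rcases hya with h | h
            · rw [if_pos h, if_pos h]
            · have hne : ¬ (t = "y" ∨ t = "and") := by
                rcases h with h | h <;> subst h <;> simp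
              rw [if_neg hne, if_pos h, if_neg hne]
          simp only [pvALoop, if_neg hno, if_pos hopc, pvBSplit, hop, List.nil_append]
          rw [pvBSplitAcc rest (ops ++ [if t = "y" ∨ t = "and" then "and" else "or"]) [cur] []]
          have := ih (ops ++ [if t = "y" ∨ t = "and" then "and" else "or"])
            (props ++ [pvAEmit (cur.filter (fun w => w ≠ "no")) (cur.contains "no")]) [] hrest (by simp)
          simp only [List.filter_nil, List.contains_nil] at this
          rw [this, pvEmitEq cur hcur]
          simp
        · have hop : pvBOp t = none := by
            unfold pvBOp
            rw [if_neg (by tauto), if_neg (by tauto)]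
          simp only [pvALoop, if_neg hno, if_neg hopc, pvBSplit, hop]
          have h1 : (cur ++ [t]).filter (fun w => w ≠ "no") = cur.filter (fun w => w ≠ "no") ++ [t] := by
            simp [hno]
          have h2 : (cur ++ [t]).contains "no" = cur.contains "no" := by
            simp
            intro h; exact absurd h.symm hno
          have := ih ops props (cur ++ [t]) hrest
            (by intro w hw; rcases List.mem_append.mp hw with h | h
                · exact hcur w h
                · simp at h; subst h; exact ht)
          rw [h1, h2] at this
          exact this

-- ===== VERDICT (by name: the statement is the Claim_ definition above) =====
theorem identificar_operadores_spec : Claim_equal_identificar_operadores := by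
  intro p _
  unfold Spec_identificar_operadores identificar_operadores identificar_operadores_alt
  have := pvKey (PySem.Str.split₀ (PySem.Str.lower p)) [] [] []
    (pvGoodSplit (PySem.Str.lower p)) (by simp)
  simpa using this
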